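-- pv_equiv track=rewrite | github.com/asmundg/adventofcode | 2016/src/day_20.py | part1
-- ===== SOURCE A (Python) =====
-- def part1(ranges: list[tuple[int, int]]) -> int:
--     ranges = sorted(ranges, key=lambda r: r[0])
--     if ranges[0][0] > 0:
--         return 0
--
--     last = ranges[0][1]
--     for a, b in ranges[1:]:
--         if a <= last + 1:
--             if b > last:
--                 last = b
--         else:
--             return last + 1
-- ===== SOURCE B (Python) =====
-- def part1(ranges: list[tuple[int, int]]) -> int:
--     rs = sorted(ranges, key=lambda r: r[0])
--     # pass 1: collapse sorted ranges into disjoint merged intervals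
--     cs, ce = rs[0]
--     merged = []
--     for a, b in rs[1:]:
--         if a <= ce + 1:
--             if b > ce:
--                 ce = b
--         else:
--             merged.append((cs, ce))
--             cs, ce = a, b
--     merged.append((cs, ce))
--     # pass 2: find the lowest uncovered value
--     if merged[0][0] > 0:
--         return 0
--     for i in range(len(merged) - 1):
--         if merged[i + 1][0] > merged[i][1] + 1:
--             return merged[i][1] + 1
-- ===== Notes on version B (the rewrite author's own statement) =====
-- stated objective: alternative
-- what changed: A fuses merging and gap detection into one loop over the sorted ranges; B first collapses the sorted ranges into an explicit list of disjoint merged intervals, then scans consecutive merged intervals in a separate pass for the first gap.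
-- outside the precondition, e.g. on part1([(0, 5)]): A returns None, B returns None; on part1([]): A raises IndexError, B raises IndexError
import Mathlib
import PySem

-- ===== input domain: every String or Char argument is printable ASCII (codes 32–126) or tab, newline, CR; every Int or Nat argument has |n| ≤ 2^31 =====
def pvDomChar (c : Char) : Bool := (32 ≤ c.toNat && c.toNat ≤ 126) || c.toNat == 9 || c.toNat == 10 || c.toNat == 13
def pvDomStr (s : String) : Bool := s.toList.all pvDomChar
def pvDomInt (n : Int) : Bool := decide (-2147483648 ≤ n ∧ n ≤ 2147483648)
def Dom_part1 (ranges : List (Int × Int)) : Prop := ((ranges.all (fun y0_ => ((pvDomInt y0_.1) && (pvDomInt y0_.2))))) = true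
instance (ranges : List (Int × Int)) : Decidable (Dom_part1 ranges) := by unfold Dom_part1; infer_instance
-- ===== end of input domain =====

-- B replaces A's fused merge-and-detect loop by two separate passes (collapse sorted
-- ranges into disjoint merged intervals, then scan consecutive intervals for the first
-- gap); objective: alternative decomposition, same value wherever A returns an int.

-- ===== PORT A =====
def part1Loop : List (Int × Int) → Int → Int
  | [], _ => 0  -- Python falls off the loop and returns None here; outside Pre_
  | (a, b) :: t, last =>
    if a ≤ last + 1 then part1Loop t (if b > last then b else last)
    else last + 1

def part1 (ranges : List (Int × Int)) : Int :=
  match PySem.List.sorted ranges (fun r => r.1) false with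
  | [] => 0  -- Python raises IndexError on ranges[0]; outside Pre_
  | (a0, b0) :: rest => if a0 > 0 then 0 else part1Loop rest b0

-- ===== PORT B =====
def mergeLoop : List (Int × Int) → Int → Int → List (Int × Int) → List (Int × Int)
  | [], cs, ce, merged => merged ++ [(cs, ce)]
  | (a, b) :: t, cs, ce, merged =>
    if a ≤ ce + 1 then mergeLoop t cs (if b > ce then b else ce) merged
    else mergeLoop t a b (merged ++ [(cs, ce)])

def gapScan : List (Int × Int) → Int
  | [] => 0
  | [_] => 0  -- Python falls off the scan and returns None here; outside Pre_
  | (_, e1) :: (s2, e2) :: t => if s2 > e1 + 1 then e1 + 1 else gapScan ((s2, e2) :: t)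

def part1_alt (ranges : List (Int × Int)) : Int :=
  match PySem.List.sorted ranges (fun r => r.1) false with
  | [] => 0  -- Python raises IndexError on rs[0]; outside Pre_
  | (cs, ce) :: rest =>
    match mergeLoop rest cs ce [] with
    | [] => 0  -- unreachable: mergeLoop always yields a nonempty list
    | (m0s, m0e) :: tail => if m0s > 0 then 0 else gapScan ((m0s, m0e) :: tail)

-- ===== PRECONDITION & SPEC =====
-- first minimal-start range of the list, used because A seeds its loop with its end
-- even when that range is reversed (start > end)
def preTieGap (ranges : List (Int × Int)) : Bool :=
  match ranges.find? (fun p0 => ranges.all (fun r => p0.1 ≤ r.1)) with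
  | some p0 => (2 ≤ ranges.countP (fun p => p.1 == p0.1)) && (p0.2 + 1 < p0.1)
  | none => false

-- Pre_ excludes the empty list (A raises IndexError) and inputs whose ranges leave no
-- detectable gap (all of [min_start, merged_end] covered), where A returns None, not an int.
def Pre_part1 (ranges : List (Int × Int)) : Prop :=
  ranges ≠ [] ∧
    ((∀ p ∈ ranges, 0 < p.1) ∨
     (∃ q ∈ ranges, (∃ p ∈ ranges, p.1 < q.1) ∧ ∀ p ∈ ranges, p.1 < q.1 → p.2 + 1 < q.1) ∨
     preTieGap ranges = true)
instance (ranges : List (Int × Int)) : Decidable (Pre_part1 ranges) := by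
  unfold Pre_part1; infer_instance

def pvWitness_part1 : (List (Int × Int)) := [(-1, 2), (5, 7)]

def Spec_part1 (ranges : List (Int × Int)) (out : Int) : Prop := out = part1_alt ranges
instance (ranges : List (Int × Int)) (out : Int) : Decidable (Spec_part1 ranges out) := by unfold Spec_part1; infer_instance

-- ===== CLAIM (what is proved, stated in full; the proofs are below) =====
def Claim_equal_part1 : Prop := ∀ (ranges : List (Int × Int)), Dom_part1 ranges → Pre_part1 ranges → Spec_part1 ranges (part1 ranges)

-- ===== LEMMAS AND PROOFS =====

theorem mergeLoop_acc (t : List (Int × Int)) :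
    ∀ (cs ce : Int) (acc : List (Int × Int)),
      mergeLoop t cs ce acc = acc ++ mergeLoop t cs ce [] := by
  induction t with
  | nil => intro cs ce acc; simp [mergeLoop]
  | cons hd tl ih =>
      intro cs ce acc
      obtain ⟨a, b⟩ := hd
      by_cases h : a ≤ ce + 1
      · simp only [mergeLoop, if_pos h]
        exact ih cs (if b > ce then b else ce) acc
      · simp only [mergeLoop, if_neg h, List.nil_append]
        rw [ih a b (acc ++ [(cs, ce)]), ih a b [(cs, ce)]]
        simp

theorem mergeLoop_head (t : List (Int × Int)) :
    ∀ (cs ce : Int), ∃ e tl, mergeLoop t cs ce [] = (cs, e) :: tl := by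
  induction t with
  | nil => intro cs ce; exact ⟨ce, [], rfl⟩
  | cons hd tl ih =>
      intro cs ce
      obtain ⟨a, b⟩ := hd
      by_cases h : a ≤ ce + 1
      · simp only [mergeLoop, if_pos h]
        exact ih cs (if b > ce then b else ce)
      · simp only [mergeLoop, if_neg h]
        rw [mergeLoop_acc]
        exact ⟨ce, mergeLoop tl a b [], by simp⟩

theorem loop_eq_gapScan (t : List (Int × Int)) :
    ∀ (cs ce : Int), part1Loop t ce = gapScan (mergeLoop t cs ce []) := by
  induction t with
  | nil => intro cs ce; simp [part1Loop, mergeLoop, gapScan]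
  | cons hd tl ih =>
      intro cs ce
      obtain ⟨a, b⟩ := hd
      by_cases h : a ≤ ce + 1
      · simp [part1Loop, mergeLoop, h, ih cs (if b > ce then b else ce)]
      · simp only [part1Loop, mergeLoop, if_neg h]
        rw [mergeLoop_acc]
        obtain ⟨e, tl', htl⟩ := mergeLoop_head tl a b
        rw [htl]
        have hgt : a > ce + 1 := by omega
        simp [gapScan, hgt]

theorem part1_eq_alt (ranges : List (Int × Int)) : part1 ranges = part1_alt ranges := by
  unfold part1 part1_alt
  cases hs : PySem.List.sorted ranges (fun r => r.1) false with
  | nil => rfl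
  | cons hd rest =>
      obtain ⟨a0, b0⟩ := hd
      obtain ⟨e, tl, htl⟩ := mergeLoop_head rest a0 b0
      show (if a0 > 0 then 0 else part1Loop rest b0) =
        (match mergeLoop rest a0 b0 [] with
         | [] => 0
         | (m0s, m0e) :: tail => if m0s > 0 then 0 else gapScan ((m0s, m0e) :: tail))
      rw [htl]
      by_cases h0 : a0 > 0
      · simp [h0]
      · simp only [if_neg h0]
        rw [loop_eq_gapScan rest a0 b0, htl]

-- ===== VERDICT (by name: the statement is the Claim_ definition above) =====
theorem part1_spec : Claim_equal_part1 := by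
  intro ranges _ _
  unfold Spec_part1
  exact part1_eq_alt ranges
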